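-- pv_equiv track=rewrite | github.com/adiseal/edabit-practices | Hold Your Breath.py | diving_minigame
-- ===== SOURCE A (Python) =====
-- def diving_minigame(altitudes):
--     breath_meter = 10
--     for altitude in altitudes:
--         if altitude < 0:
--             breath_meter -= 2
--         else:
--             breath_meter = min(10, breath_meter + 4)
--         if breath_meter <= 0:
--             return False
--     return True
-- ===== SOURCE B (Python) =====
-- def diving_minigame(altitudes):
--     # Min-plus reformulation: with deltas -2 (negative altitude) / +4 (otherwise),
--     # the breath meter after step i equals 10 + S_i - max S_k over "cap points" k
--     # (the start and every nonnegative altitude, where the cap of 10 applies).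
--     # Track the prefix sum, the running max over cap points, and the worst breath.
--     s = best = 0
--     worst = 10
--     for a in altitudes:
--         if a < 0:
--             s -= 2
--         else:
--             s += 4
--             best = max(best, s)
--         worst = min(worst, 10 + s - best)
--     return worst > 0
-- ===== Notes on version B (the rewrite author's own statement) =====
-- stated objective: alternative
-- what changed: B never maintains the capped breath meter: it reformulates the recurrence in min-plus form, tracking a prefix sum of raw deltas, a running max of that sum over cap points (start and nonnegative altitudes), and the running minimum of 10 + sum - max, returning whether that minimum stays positive.
import Mathlib
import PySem

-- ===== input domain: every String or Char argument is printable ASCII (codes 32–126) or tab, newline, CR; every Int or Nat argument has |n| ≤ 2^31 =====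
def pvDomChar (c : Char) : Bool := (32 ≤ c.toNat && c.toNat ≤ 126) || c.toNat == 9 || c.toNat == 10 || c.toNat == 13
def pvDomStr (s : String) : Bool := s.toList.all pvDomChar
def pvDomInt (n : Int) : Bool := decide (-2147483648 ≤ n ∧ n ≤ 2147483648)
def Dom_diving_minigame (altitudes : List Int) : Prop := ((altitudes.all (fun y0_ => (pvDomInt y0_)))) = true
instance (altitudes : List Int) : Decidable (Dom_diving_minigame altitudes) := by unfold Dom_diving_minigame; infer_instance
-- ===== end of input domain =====

-- B drops A's capped breath meter for a min-plus reformulation (prefix sum of raw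
-- deltas, running max over cap points, running min of the induced breath): an
-- alternative algorithm of the same cost.

-- ===== PORT A =====
def divingLoop (breath : Int) (l : List Int) : Bool :=
  match l with
  | [] => true
  | a :: rest =>
    let b := if a < 0 then breath - 2 else min 10 (breath + 4)
    if b ≤ 0 then false else divingLoop b rest

def diving_minigame (altitudes : List Int) : Bool := divingLoop 10 altitudes

-- ===== PORT B =====
-- state = (s, best, worst): prefix sum of deltas, max of s over cap points, min breath so far
def altStep (st : Int × Int × Int) (a : Int) : Int × Int × Int :=
  let s' := if a < 0 then st.1 - 2 else st.1 + 4
  let best' := if a < 0 then st.2.1 else max st.2.1 s'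
  (s', best', min st.2.2 (10 + s' - best'))

def diving_minigame_alt (altitudes : List Int) : Bool :=
  decide (0 < (altitudes.foldl altStep (0, 0, 10)).2.2)

-- ===== PRECONDITION & SPEC =====
def Spec_diving_minigame (altitudes : List Int) (out : Bool) : Prop := out = diving_minigame_alt altitudes
instance (altitudes : List Int) (out : Bool) : Decidable (Spec_diving_minigame altitudes out) := by unfold Spec_diving_minigame; infer_instance

-- ===== CLAIM (what is proved, stated in full; the proofs are below) =====
def Claim_equal_diving_minigame : Prop := ∀ (altitudes : List Int), Dom_diving_minigame altitudes → Spec_diving_minigame altitudes (diving_minigame altitudes)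

-- ===== LEMMAS AND PROOFS =====

-- the worst-breath component only ever decreases along the fold
theorem altFold_worst_mono (l : List Int) : ∀ st : Int × Int × Int,
    (l.foldl altStep st).2.2 ≤ st.2.2 := by
  induction l with
  | nil => intro st; simp
  | cons a rest ih =>
    intro st
    refine le_trans (ih (altStep st a)) ?_
    simp [altStep]

theorem divingLoop_eq_fold (l : List Int) : ∀ (s best worst : Int),
    0 < worst →
    divingLoop (10 + s - best) l = decide (0 < (l.foldl altStep (s, best, worst)).2.2) := by
  induction l with
  | nil =>
    intro s best worst h
    simp [divingLoop, h]
  | cons a rest ih =>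
    intro s best worst h
    have hb : (if a < 0 then (10 + s - best) - 2 else min 10 ((10 + s - best) + 4))
        = 10 + (if a < 0 then s - 2 else s + 4)
            - (if a < 0 then best else max best (if a < 0 then s - 2 else s + 4)) := by
      split_ifs with hneg <;> omega
    simp only [divingLoop, List.foldl_cons]
    rw [hb]
    set s' := if a < 0 then s - 2 else s + 4 with hs'
    set best' := if a < 0 then best else max best s' with hbest'
    by_cases hle : 10 + s' - best' ≤ 0
    · rw [if_pos hle]
      have hmono := altFold_worst_mono rest (altStep (s, best, worst) a)
      have hstep : (altStep (s, best, worst) a).2.2 = min worst (10 + s' - best') := by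
        simp [altStep, ← hs', ← hbest']
      rw [hstep] at hmono
      have : ¬ 0 < (rest.foldl altStep (altStep (s, best, worst) a)).2.2 := by omega
      simp [this]
    · rw [if_neg hle]
      have hstep : altStep (s, best, worst) a = (s', best', min worst (10 + s' - best')) := by
        simp [altStep, ← hs', ← hbest']
      simp only [hstep]
      exact ih s' best' _ (by omega)

-- ===== VERDICT (by name: the statement is the Claim_ definition above) =====
theorem diving_minigame_spec : Claim_equal_diving_minigame := by
  intro altitudes _
  unfold Spec_diving_minigame diving_minigame diving_minigame_alt
  have := divingLoop_eq_fold altitudes 0 0 10 (by norm_num)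
  simpa using this
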